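-- pv_equiv track=rewrite | github.com/contatoinstitutodrudi/drudi-astro | scripts/fix_breadcrumb_pills.py | remove_badge_pill
-- ===== SOURCE A (Python) =====
-- def remove_badge_pill(text: str) -> tuple[str, int]:
--     """Remove o bloco <div ... bg-gold/15 border border-gold/30 rounded-full ...> ... </div>"""
--     lines = text.split("\n")
--     result = []
--     skip = False
--     depth = 0
--     removed = 0
--
--     i = 0
--     while i < len(lines):
--         line = lines[i]
--
--         if not skip:
--             # Detectar início do badge pill hero
--             if (
--                 "inline-flex" in line
--                 and "bg-gold/15" in line
--                 and "border-gold/30" in line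
--                 and "rounded-full" in line
--                 and "aos-element" in line  # só os badges hero dos institutos
--             ):
--                 skip = True
--                 depth = line.count("<div") - line.count("</div>")
--                 removed += 1
--                 i += 1
--                 continue
--         else:
--             depth += line.count("<div") - line.count("</div>")
--             if depth <= 0:
--                 skip = False
--                 i += 1
--                 continue
--             i += 1
--             continue
--
--         result.append(line)
--         i += 1
--
--     return "\n".join(result), removed
-- ===== SOURCE B (Python) =====
-- def remove_badge_pill(text: str) -> tuple[str, int]:
--     """Remove o bloco <div ... bg-gold/15 border border-gold/30 rounded-full ...> ... </div>"""
--     lines = text.split("\n")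
--     n = len(lines)
--
--     # Pass 1: collect each badge block as a half-open index range [start, end).
--     ranges = []
--     i = 0
--     while i < n:
--         line = lines[i]
--         if (
--             "inline-flex" in line
--             and "bg-gold/15" in line
--             and "border-gold/30" in line
--             and "rounded-full" in line
--             and "aos-element" in line
--         ):
--             depth = line.count("<div") - line.count("</div>")
--             j = i + 1
--             while j < n:
--                 depth += lines[j].count("<div") - lines[j].count("</div>")
--                 j += 1
--                 if depth <= 0:
--                     break
--             ranges.append((i, j))
--             i = j
--         else:
--             i += 1
--
--     # Pass 2: keep exactly the lines whose index lies in no removal range.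
--     kept = [ln for idx, ln in enumerate(lines)
--             if not any(a <= idx < b for a, b in ranges)]
--     return "\n".join(kept), len(ranges)
-- ===== Notes on version B (the rewrite author's own statement) =====
-- stated objective: alternative
-- what changed: A's single while-loop with a skip flag and mutable depth is replaced by two passes: pass 1 collects each badge block as an index range [start, end) via a nested consuming loop, pass 2 keeps exactly the lines whose index lies in no range and returns len(ranges) as the removed count.
import Mathlib
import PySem

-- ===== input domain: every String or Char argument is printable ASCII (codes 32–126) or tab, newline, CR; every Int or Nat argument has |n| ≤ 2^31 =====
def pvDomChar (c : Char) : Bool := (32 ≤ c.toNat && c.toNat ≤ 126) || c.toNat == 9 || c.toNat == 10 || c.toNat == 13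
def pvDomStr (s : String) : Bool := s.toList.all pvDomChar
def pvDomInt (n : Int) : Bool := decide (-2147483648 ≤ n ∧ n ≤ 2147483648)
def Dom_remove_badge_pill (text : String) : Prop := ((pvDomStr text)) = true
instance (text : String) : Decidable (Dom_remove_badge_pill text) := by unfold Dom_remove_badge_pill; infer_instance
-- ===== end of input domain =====

-- B replaces A's skip-flag single loop by two passes — collect badge blocks as index ranges,
-- then filter lines by range membership (objective: alternative decomposition, same cost).

-- shared helpers: the badge-start test and a line's <div>-balance (both Pythons contain these expressions)
def rbpStart (line : List Char) : Bool :=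
  PySem.Chars.isIn "inline-flex".toList line &&
  PySem.Chars.isIn "bg-gold/15".toList line &&
  PySem.Chars.isIn "border-gold/30".toList line &&
  PySem.Chars.isIn "rounded-full".toList line &&
  PySem.Chars.isIn "aos-element".toList line

def rbpBal (line : List Char) : Int :=
  (PySem.Chars.count line "<div".toList : Int) - (PySem.Chars.count line "</div>".toList : Int)

-- ===== PORT A =====
-- A's while-loop over `lines` with state (skip, depth, result, removed), branch for branch
def rbpLoopA : List (List Char) → Bool → Int → List (List Char) → Int → List (List Char) × Int
  | [], _, _, result, removed => (result, removed)
  | line :: rest, false, depth, result, removed =>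
    if rbpStart line then
      rbpLoopA rest true (rbpBal line) result (removed + 1)
    else
      rbpLoopA rest false depth (result ++ [line]) removed
  | line :: rest, true, depth, result, removed =>
    let d := depth + rbpBal line
    if d ≤ 0 then rbpLoopA rest false d result removed
    else rbpLoopA rest true d result removed

def remove_badge_pill (text : String) : String × Int :=
  let lines := PySem.Chars.splitOn text.toList "\n".toList
  let r := rbpLoopA lines false 0 [] 0
  (String.ofList (PySem.Chars.join "\n".toList r.1), r.2)

-- ===== PORT B =====
-- B's inner while: consume a block given the running depth and the next index j; returns (end index, remaining lines)
def rbpConsume : List (List Char) → Int → Nat → Nat × List (List Char)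
  | [], _, j => (j, [])
  | line :: rest, depth, j =>
    let d := depth + rbpBal line
    if d ≤ 0 then (j + 1, rest) else rbpConsume rest d (j + 1)

theorem rbpConsume_len_le : ∀ (rest : List (List Char)) (d : Int) (j : Nat),
    (rbpConsume rest d j).2.length ≤ rest.length := by
  intro rest
  induction rest with
  | nil => intro d j; simp [rbpConsume]
  | cons l t ih =>
    intro d j
    simp only [rbpConsume]
    split
    · simp
    · exact le_trans (ih _ _) (by simp)

-- B's outer while (pass 1): collect the removal ranges [i, j)
def rbpCollect : List (List Char) → Nat → List (Nat × Nat)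
  | [], _ => []
  | line :: rest, i =>
    if rbpStart line then
      let c := rbpConsume rest (rbpBal line) (i + 1)
      (i, c.1) :: rbpCollect c.2 c.1
    else rbpCollect rest (i + 1)
termination_by xs _ => xs.length
decreasing_by
  · exact Nat.lt_succ_of_le (rbpConsume_len_le _ _ _)
  · simp

-- B's `any(a <= idx < b for a, b in ranges)`
def rbpInAny (ranges : List (Nat × Nat)) (idx : Nat) : Bool :=
  ranges.any (fun r => decide (r.1 ≤ idx) && decide (idx < r.2))

def remove_badge_pill_alt (text : String) : String × Int :=
  let lines := PySem.Chars.splitOn text.toList "\n".toList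
  let ranges := rbpCollect lines 0
  let kept := ((lines.zipIdx 0).filter (fun p => !rbpInAny ranges p.2)).map Prod.fst
  (String.ofList (PySem.Chars.join "\n".toList kept), (ranges.length : Int))

-- ===== PRECONDITION & SPEC =====
def Spec_remove_badge_pill (text : String) (out : String × Int) : Prop := out = remove_badge_pill_alt text
instance (text : String) (out : String × Int) : Decidable (Spec_remove_badge_pill text out) := by unfold Spec_remove_badge_pill; infer_instance

-- ===== CLAIM (what is proved, stated in full; the proofs are below) =====
def Claim_equal_remove_badge_pill : Prop := ∀ (text : String), Dom_remove_badge_pill text → Spec_remove_badge_pill text (remove_badge_pill text)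

-- ===== LEMMAS AND PROOFS =====

-- in A's non-skip mode the depth parameter is dead state
theorem rbpLoopA_depth_irrel : ∀ (xs : List (List Char)) (d1 d2 : Int) (acc : List (List Char)) (r : Int),
    rbpLoopA xs false d1 acc r = rbpLoopA xs false d2 acc r := by
  intro xs
  induction xs with
  | nil => intros; rfl
  | cons l t ih =>
    intro d1 d2 acc r
    simp only [rbpLoopA]
    split
    · rfl
    · exact ih _ _ _ _

-- rbpConsume returns (j + k, rest.drop k) for the number k of consumed lines
theorem rbpConsume_spec : ∀ (rest : List (List Char)) (d : Int) (j : Nat),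
    ∃ k, k ≤ rest.length ∧ rbpConsume rest d j = (j + k, rest.drop k) := by
  intro rest
  induction rest with
  | nil => intro d j; exact ⟨0, by simp [rbpConsume]⟩
  | cons l t ih =>
    intro d j
    simp only [rbpConsume]
    split
    · exact ⟨1, by simp⟩
    · obtain ⟨k, hk, he⟩ := ih (d + rbpBal l) (j + 1)
      refine ⟨k + 1, by simpa using hk, ?_⟩
      rw [he]
      simp
      omega

-- A's skip mode equals B's consume: it resumes fresh on the remainder rbpConsume returns
theorem rbpLoopA_skip_eq_consume : ∀ (rest : List (List Char)) (d : Int) (j : Nat)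
    (acc : List (List Char)) (r : Int),
    rbpLoopA rest true d acc r = rbpLoopA (rbpConsume rest d j).2 false 0 acc r := by
  intro rest
  induction rest with
  | nil => intros; rfl
  | cons l t ih =>
    intro d j acc r
    simp only [rbpLoopA, rbpConsume]
    split
    · exact rbpLoopA_depth_irrel _ _ _ _ _
    · exact ih _ (j + 1) _ _

-- every range collected from offset i starts at ≥ i and is nonempty
theorem rbpCollect_bounds : ∀ (n : Nat) (xs : List (List Char)), xs.length ≤ n →
    ∀ (i : Nat) (r : Nat × Nat), r ∈ rbpCollect xs i → i ≤ r.1 ∧ r.1 < r.2 := by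
  intro n
  induction n with
  | zero =>
    intro xs hx
    rw [List.length_eq_zero_iff.mp (Nat.le_zero.mp hx)]
    intro i r h
    simp [rbpCollect] at h
  | succ n ih =>
    intro xs hx i r h
    cases xs with
    | nil => simp [rbpCollect] at h
    | cons l rest =>
      by_cases hs : rbpStart l
      · obtain ⟨k, hk, hc⟩ := rbpConsume_spec rest (rbpBal l) (i + 1)
        rw [rbpCollect, if_pos hs, hc] at h
        simp only [List.mem_cons] at h
        rcases h with h | h
        · subst h; simp; omega
        · have hlen : (rest.drop k).length ≤ n := by
            simp at hx ⊢; omega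
          have := ih (rest.drop k) hlen (i + 1 + k) r h
          omega
      · rw [rbpCollect, if_neg hs] at h
        have hlen : rest.length ≤ n := by simp at hx; omega
        have := ih rest hlen (i + 1) r h
        omega

-- main invariant: A's loop from fresh state = B's ranges-filter of the suffix enumerated from i
theorem rbp_main : ∀ (n : Nat) (xs : List (List Char)), xs.length ≤ n → ∀ (i : Nat)
    (acc : List (List Char)) (r : Int),
    rbpLoopA xs false 0 acc r =
      (acc ++ ((xs.zipIdx i).filter (fun p => !rbpInAny (rbpCollect xs i) p.2)).map Prod.fst,
       r + ((rbpCollect xs i).length : Int)) := by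
  intro n
  induction n with
  | zero =>
    intro xs hx
    rw [List.length_eq_zero_iff.mp (Nat.le_zero.mp hx)]
    intro i acc r
    simp [rbpLoopA, rbpCollect]
  | succ n ih =>
    intro xs hx i acc r
    cases xs with
    | nil => simp [rbpLoopA, rbpCollect]
    | cons l rest =>
      have hrest : rest.length ≤ n := by simp at hx; omega
      by_cases hs : rbpStart l
      · -- start line: A enters skip mode, B records a range
        obtain ⟨k, hk, hc⟩ := rbpConsume_spec rest (rbpBal l) (i + 1)
        rw [rbpLoopA, if_pos hs, rbpLoopA_skip_eq_consume rest (rbpBal l) (i + 1) acc (r + 1), hc]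
        have hdlen : (rest.drop k).length ≤ n := by simp; omega
        rw [ih (rest.drop k) hdlen (i + 1 + k) acc (r + 1)]
        rw [rbpCollect, if_pos hs, hc]
        simp only [Prod.mk.injEq]
        constructor
        · -- kept lines coincide
          rw [List.zipIdx_cons]
          generalize hrs : rbpCollect (List.drop k rest) (i + 1 + k) = rs
          have hsplit : rest.zipIdx (i + 1) =
              (List.take k rest).zipIdx (i + 1) ++ (List.drop k rest).zipIdx (i + 1 + k) := by
            conv_lhs => rw [← List.take_append_drop k rest]
            rw [List.zipIdx_append]
            congr 2
            simp
            omega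
          rw [hsplit, List.filter_cons, List.filter_append]
          have hhead : (!rbpInAny ((i, i + 1 + k) :: rs) (l, i).2) = false := by
            simp [rbpInAny]
            omega
          rw [hhead]
          have htake : (List.filter (fun p => !rbpInAny ((i, i + 1 + k) :: rs) p.2)
              ((List.take k rest).zipIdx (i + 1))) = [] := by
            rw [List.filter_eq_nil_iff]
            rintro ⟨x, m⟩ hm
            have hb := List.mem_zipIdx hm
            have htk : (List.take k rest).length = k := by simp; omega
            rw [htk] at hb
            simp [rbpInAny]
            omega
          rw [htake]
          have hcongr : (List.filter (fun p => !rbpInAny ((i, i + 1 + k) :: rs) p.2)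
              ((List.drop k rest).zipIdx (i + 1 + k))) =
              (List.filter (fun p => !rbpInAny rs p.2)
              ((List.drop k rest).zipIdx (i + 1 + k))) := by
            apply List.filter_congr
            rintro ⟨x, m⟩ hm
            have hb := List.mem_zipIdx hm
            simp [rbpInAny]
            omega
          rw [hcongr]
          simp
        · simp only [List.length_cons]
          push_cast
          ring
      · -- ordinary line: kept by both
        rw [rbpLoopA, if_neg hs, ih rest hrest (i + 1) (acc ++ [l]) r]
        rw [rbpCollect, if_neg hs]
        simp only [Prod.mk.injEq]
        constructor
        · rw [List.zipIdx_cons, List.filter_cons]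
          have hhead : (!rbpInAny (rbpCollect rest (i + 1)) i) = true := by
            simp only [rbpInAny, Bool.not_eq_true', List.any_eq_false]
            rintro ⟨a, b⟩ hab
            have := rbpCollect_bounds rest.length rest le_rfl (i + 1) (a, b) hab
            simp
            omega
          rw [hhead]
          simp
        · simp

-- ===== VERDICT =====
theorem remove_badge_pill_spec : Claim_equal_remove_badge_pill := by
  intro text _
  unfold Spec_remove_badge_pill remove_badge_pill remove_badge_pill_alt
  simp only
  rw [rbp_main (PySem.Chars.splitOn text.toList "\n".toList).length _ le_rfl 0 [] 0]
  simp
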